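-- pv_equiv track=rewrite | github.com/kenstott/constat | constat/discovery/models.py | is_camel_case
-- ===== SOURCE A (Python) =====
-- def is_camel_case(name: str) -> bool:
--     """Detect if a name is in CamelCase or camelCase format.
--
--     CamelCase names are schema/code identifiers that should be split into words.
--     Examples: BillingAddress, firstName, OrderItems, getUserById, XMLParser
--
--     Args:
--         name: Name to check
--
--     Returns:
--         True if the name appears to be CamelCase
--     """
--     if not name or len(name) < 2:
--         return False
--
--     # Check for lowercase followed by uppercase (e.g., "firstName", "billingAddress")
--     for i in range(len(name) - 1):
--         if name[i].islower() and name[i + 1].isupper():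
--             return True
--
--     # Check for uppercase sequence followed by uppercase+lowercase (e.g., "XMLParser")
--     # Pattern: 2+ uppercase letters followed by uppercase+lowercase
--     for i in range(len(name) - 2):
--         if name[i].isupper() and name[i + 1].isupper() and name[i + 2].islower():
--             return True
--
--     return False
-- ===== SOURCE B (Python) =====
-- def is_camel_case(name: str) -> bool:
--     """Detect if a name is in CamelCase or camelCase format."""
--     # Classify each character once: 'L' lower, 'U' upper, 'O' other.
--     cats = ''.join(
--         'L' if c.islower() else 'U' if c.isupper() else 'O' for c in name
--     )
--     # camelCase boundary = lower followed by upper; acronym boundary = "UUL".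
--     return 'LU' in cats or 'UUL' in cats
-- ===== Notes on version B (the rewrite author's own statement) =====
-- stated objective: faster
-- what changed: Replaces the two index-based adjacency scans by a single pass mapping each character to a case-category symbol ('L'/'U'/'O') followed by two substring tests ('LU' in cats, 'UUL' in cats); the redundant length<2 guard disappears.
import Mathlib
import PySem

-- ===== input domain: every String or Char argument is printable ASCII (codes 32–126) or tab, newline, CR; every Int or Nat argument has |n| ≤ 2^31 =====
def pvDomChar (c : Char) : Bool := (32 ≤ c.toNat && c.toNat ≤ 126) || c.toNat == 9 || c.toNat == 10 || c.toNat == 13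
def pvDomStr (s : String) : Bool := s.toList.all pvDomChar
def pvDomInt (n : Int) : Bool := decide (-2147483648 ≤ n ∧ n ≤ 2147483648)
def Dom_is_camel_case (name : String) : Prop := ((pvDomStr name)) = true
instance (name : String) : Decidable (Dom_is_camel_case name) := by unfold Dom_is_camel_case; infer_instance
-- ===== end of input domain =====

-- B classifies each character into a case-category list ('L'/'U'/'O') and tests for the
-- substrings "LU" and "UUL", instead of A's two index-based adjacency scans (idiomatic rewrite).

-- ===== PORT A =====
def is_camel_case (name : String) : Bool :=
  let cs := name.toList
  if cs.length < 2 then false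
  else if (PySem.List.pyRange 0 ((cs.length : Int) - 1) 1).any (fun i =>
      PySem.Chars.islower (PySem.List.pyGetD cs i ' ') &&
      PySem.Chars.isupper (PySem.List.pyGetD cs (i + 1) ' ')) then true
  else if (PySem.List.pyRange 0 ((cs.length : Int) - 2) 1).any (fun i =>
      PySem.Chars.isupper (PySem.List.pyGetD cs i ' ') &&
      PySem.Chars.isupper (PySem.List.pyGetD cs (i + 1) ' ') &&
      PySem.Chars.islower (PySem.List.pyGetD cs (i + 2) ' ')) then true
  else false

-- ===== PORT B =====
def is_camel_case_alt (name : String) : Bool :=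
  let cats := name.toList.map (fun c =>
    if PySem.Chars.islower c then 'L' else if PySem.Chars.isupper c then 'U' else 'O')
  PySem.Chars.isIn ['L', 'U'] cats || PySem.Chars.isIn ['U', 'U', 'L'] cats

-- ===== PRECONDITION & SPEC =====
def Spec_is_camel_case (name : String) (out : Bool) : Prop := out = is_camel_case_alt name
instance (name : String) (out : Bool) : Decidable (Spec_is_camel_case name out) := by
  unfold Spec_is_camel_case; infer_instance

-- ===== CLAIM =====
def Claim_equal_is_camel_case : Prop :=
  ∀ (name : String), Dom_is_camel_case name → Spec_is_camel_case name (is_camel_case name)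

-- ===== LEMMAS AND PROOFS =====

/-- The category map used by B. -/
def pvCat (c : Char) : Char :=
  if PySem.Chars.islower c then 'L' else if PySem.Chars.isupper c then 'U' else 'O'

/-- canonical form: a lowercase character immediately followed by an uppercase one -/
def pvHasLU (cs : List Char) : Prop :=
  ∃ j : Nat, (∃ c, cs[j]? = some c ∧ PySem.Chars.islower c = true) ∧
    (∃ d, cs[j + 1]? = some d ∧ PySem.Chars.isupper d = true)

/-- canonical form: two uppercase characters immediately followed by a lowercase one -/
def pvHasUUL (cs : List Char) : Prop :=
  ∃ j : Nat, (∃ c, cs[j]? = some c ∧ PySem.Chars.isupper c = true) ∧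
    (∃ d, cs[j + 1]? = some d ∧ PySem.Chars.isupper d = true) ∧
    (∃ e, cs[j + 2]? = some e ∧ PySem.Chars.islower e = true)

theorem pvCat_eq_L {c : Char} : pvCat c = 'L' ↔ PySem.Chars.islower c = true := by
  unfold pvCat
  by_cases h1 : PySem.Chars.islower c = true
  · simp [h1]
  · rw [if_neg h1]
    constructor
    · intro h
      by_cases h2 : PySem.Chars.isupper c = true
      · rw [if_pos h2] at h; exact absurd h (by decide)
      · rw [if_neg h2] at h; exact absurd h (by decide)
    · intro h; exact absurd h h1

theorem lower_not_upper {c : Char} (h : PySem.Chars.islower c = true) :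
    PySem.Chars.isupper c = false := by
  simp [PySem.Chars.islower, Char.le_def, UInt32.le_iff_toNat_le] at h
  simp [PySem.Chars.isupper, Char.le_def, UInt32.le_iff_toNat_le]
  omega

theorem pvCat_eq_U {c : Char} : pvCat c = 'U' ↔ PySem.Chars.isupper c = true := by
  unfold pvCat
  by_cases h1 : PySem.Chars.islower c = true
  · rw [if_pos h1]
    constructor
    · intro h; exact absurd h (by decide)
    · intro h
      have h2 := lower_not_upper h1
      rw [h] at h2
      exact absurd h2 (by decide)
  · rw [if_neg h1]
    by_cases h2 : PySem.Chars.isupper c = true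
    · simp [h2]
    · rw [if_neg h2]
      constructor
      · intro h; exact absurd h (by decide)
      · intro h; exact absurd h h2

/-- A two-character prefix, characterised by the first two elements. -/
theorem prefix_pair {a b : Char} {m : List Char} :
    [a, b] <+: m ↔ m[0]? = some a ∧ m[1]? = some b := by
  match m with
  | [] => simp
  | [x] => simp [List.cons_prefix_cons]
  | x :: y :: r => simp [List.cons_prefix_cons, eq_comm]

theorem prefix_triple {a b c : Char} {m : List Char} :
    [a, b, c] <+: m ↔ m[0]? = some a ∧ m[1]? = some b ∧ m[2]? = some c := by
  match m with
  | [] => simp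
  | [x] => simp [List.cons_prefix_cons]
  | [x, y] => simp [List.cons_prefix_cons]
  | x :: y :: z :: r => simp [List.cons_prefix_cons, eq_comm]

/-- index form of `sub in s` for a 2-char pattern -/
theorem isIn_pair_iff {a b : Char} {t : List Char} :
    PySem.Chars.isIn [a, b] t = true ↔ ∃ j : Nat, t[j]? = some a ∧ t[j + 1]? = some b := by
  rw [← PySem.Chars.exists_prefix_drop_iff_isIn]
  refine exists_congr fun j => ?_
  rw [prefix_pair, List.getElem?_drop, List.getElem?_drop]
  simp

theorem isIn_triple_iff {a b c : Char} {t : List Char} :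
    PySem.Chars.isIn [a, b, c] t = true ↔
      ∃ j : Nat, t[j]? = some a ∧ t[j + 1]? = some b ∧ t[j + 2]? = some c := by
  rw [← PySem.Chars.exists_prefix_drop_iff_isIn]
  refine exists_congr fun j => ?_
  rw [prefix_triple, List.getElem?_drop, List.getElem?_drop, List.getElem?_drop]
  simp

theorem any_pyRange_iff {m : Int} {P : Int → Bool} :
    (PySem.List.pyRange 0 m 1).any P = true ↔ ∃ i : Int, 0 ≤ i ∧ i < m ∧ P i = true := by
  rw [List.any_eq_true]
  constructor
  · rintro ⟨i, hi, hp⟩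
    rw [PySem.List.mem_pyRange_one] at hi
    exact ⟨i, hi.1, hi.2, hp⟩
  · rintro ⟨i, h0, h1, hp⟩
    exact ⟨i, PySem.List.mem_pyRange_one.mpr ⟨h0, h1⟩, hp⟩

theorem alt_iff (name : String) :
    is_camel_case_alt name = true ↔ pvHasLU name.toList ∨ pvHasUUL name.toList := by
  unfold is_camel_case_alt pvHasLU pvHasUUL
  rw [Bool.or_eq_true, isIn_pair_iff, isIn_triple_iff]
  simp only [List.getElem?_map, Option.map_eq_some_iff]
  constructor
  · rintro (⟨j, ⟨c, hc, hcL⟩, ⟨d, hd, hdU⟩⟩ | ⟨j, ⟨c, hc, hcU⟩, ⟨d, hd, hdU⟩, ⟨e, he, heL⟩⟩)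
    · exact Or.inl ⟨j, ⟨c, hc, pvCat_eq_L.mp hcL⟩, ⟨d, hd, pvCat_eq_U.mp hdU⟩⟩
    · exact Or.inr ⟨j, ⟨c, hc, pvCat_eq_U.mp hcU⟩, ⟨d, hd, pvCat_eq_U.mp hdU⟩, ⟨e, he, pvCat_eq_L.mp heL⟩⟩
  · rintro (⟨j, ⟨c, hc, hcL⟩, ⟨d, hd, hdU⟩⟩ | ⟨j, ⟨c, hc, hcU⟩, ⟨d, hd, hdU⟩, ⟨e, he, heL⟩⟩)
    · exact Or.inl ⟨j, ⟨c, hc, pvCat_eq_L.mpr hcL⟩, ⟨d, hd, pvCat_eq_U.mpr hdU⟩⟩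
    · exact Or.inr ⟨j, ⟨c, hc, pvCat_eq_U.mpr hcU⟩, ⟨d, hd, pvCat_eq_U.mpr hdU⟩, ⟨e, he, pvCat_eq_L.mpr heL⟩⟩

theorem scan1_iff (cs : List Char) :
    (∃ i : Int, 0 ≤ i ∧ i < (cs.length : Int) - 1 ∧
      (PySem.Chars.islower (PySem.List.pyGetD cs i ' ') &&
       PySem.Chars.isupper (PySem.List.pyGetD cs (i + 1) ' ')) = true) ↔ pvHasLU cs := by
  unfold pvHasLU
  constructor
  · rintro ⟨i, h0, h1, hp⟩
    rw [Bool.and_eq_true] at hp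
    obtain ⟨hpl, hpu⟩ := hp
    have hl1 : i < (cs.length : Int) := by omega
    have hl2 : i + 1 < (cs.length : Int) := by omega
    rw [PySem.List.pyGetD_eq_getElem cs ' ' h0 hl1] at hpl
    rw [PySem.List.pyGetD_eq_getElem cs ' ' (by omega) hl2] at hpu
    have ht : (i + 1).toNat = i.toNat + 1 := by omega
    simp only [ht] at hpu
    have hj2 : i.toNat + 1 < cs.length := by omega
    exact ⟨i.toNat, ⟨_, List.getElem?_eq_getElem (by omega), hpl⟩,
      ⟨_, List.getElem?_eq_getElem hj2, hpu⟩⟩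
  · rintro ⟨j, ⟨c, hc, hcl⟩, ⟨d, hd, hdu⟩⟩
    obtain ⟨hjc, rfl⟩ := List.getElem?_eq_some_iff.mp hc
    obtain ⟨hjd, rfl⟩ := List.getElem?_eq_some_iff.mp hd
    refine ⟨(j : Int), by omega, by omega, ?_⟩
    rw [Bool.and_eq_true]
    rw [PySem.List.pyGetD_eq_getElem cs ' ' (by omega) (by omega)]
    rw [PySem.List.pyGetD_eq_getElem cs ' ' (by omega) (by omega)]
    have h1 : ((j : Int)).toNat = j := by omega
    have h2 : ((j : Int) + 1).toNat = j + 1 := by omega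
    simp only [h1, h2]
    exact ⟨hcl, hdu⟩

theorem scan2_iff (cs : List Char) :
    (∃ i : Int, 0 ≤ i ∧ i < (cs.length : Int) - 2 ∧
      (PySem.Chars.isupper (PySem.List.pyGetD cs i ' ') &&
       PySem.Chars.isupper (PySem.List.pyGetD cs (i + 1) ' ') &&
       PySem.Chars.islower (PySem.List.pyGetD cs (i + 2) ' ')) = true) ↔ pvHasUUL cs := by
  unfold pvHasUUL
  constructor
  · rintro ⟨i, h0, h1, hp⟩
    simp only [Bool.and_eq_true] at hp
    obtain ⟨⟨hp1, hp2⟩, hp3⟩ := hp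
    have hl1 : i < (cs.length : Int) := by omega
    rw [PySem.List.pyGetD_eq_getElem cs ' ' h0 hl1] at hp1
    rw [PySem.List.pyGetD_eq_getElem cs ' ' (by omega) (by omega)] at hp2
    rw [PySem.List.pyGetD_eq_getElem cs ' ' (by omega) (by omega)] at hp3
    have ht1 : (i + 1).toNat = i.toNat + 1 := by omega
    have ht2 : (i + 2).toNat = i.toNat + 2 := by omega
    simp only [ht1] at hp2
    simp only [ht2] at hp3
    exact ⟨i.toNat, ⟨_, List.getElem?_eq_getElem (by omega), hp1⟩,
      ⟨_, List.getElem?_eq_getElem (by omega), hp2⟩,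
      ⟨_, List.getElem?_eq_getElem (by omega), hp3⟩⟩
  · rintro ⟨j, ⟨c, hc, hcu⟩, ⟨d, hd, hdu⟩, ⟨e, he, hel⟩⟩
    obtain ⟨hjc, rfl⟩ := List.getElem?_eq_some_iff.mp hc
    obtain ⟨hjd, rfl⟩ := List.getElem?_eq_some_iff.mp hd
    obtain ⟨hje, rfl⟩ := List.getElem?_eq_some_iff.mp he
    refine ⟨(j : Int), by omega, by omega, ?_⟩
    simp only [Bool.and_eq_true]
    rw [PySem.List.pyGetD_eq_getElem cs ' ' (by omega) (by omega)]
    rw [PySem.List.pyGetD_eq_getElem cs ' ' (by omega) (by omega)]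
    rw [PySem.List.pyGetD_eq_getElem cs ' ' (by omega) (by omega)]
    have h1 : ((j : Int)).toNat = j := by omega
    have h2 : ((j : Int) + 1).toNat = j + 1 := by omega
    have h3 : ((j : Int) + 2).toNat = j + 2 := by omega
    simp only [h1, h2, h3]
    exact ⟨⟨hcu, hdu⟩, hel⟩

theorem ite_ite_eq_true {a b : Bool} :
    (if a then true else if b then true else false) = true ↔ a = true ∨ b = true := by
  cases a <;> cases b <;> simp

theorem a_iff (name : String) :
    is_camel_case name = true ↔ pvHasLU name.toList ∨ pvHasUUL name.toList := by
  unfold is_camel_case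
  by_cases hlen : name.toList.length < 2
  · simp only [hlen, if_true]
    constructor
    · intro h; cases h
    · rintro (⟨j, ⟨c, hc, _⟩, ⟨d, hd, _⟩⟩ | ⟨j, ⟨c, hc, _⟩, ⟨d, hd, _⟩, _⟩) <;>
        · obtain ⟨hb, -⟩ := List.getElem?_eq_some_iff.mp hd
          omega
  · simp only [hlen, if_false]
    rw [ite_ite_eq_true]
    simp only [any_pyRange_iff]
    rw [scan1_iff name.toList, scan2_iff name.toList]

theorem main_eq (name : String) : is_camel_case name = is_camel_case_alt name := by
  have h := (a_iff name).trans (alt_iff name).symm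
  cases ha : is_camel_case name <;> cases hb : is_camel_case_alt name <;> simp_all

-- ===== VERDICT =====
theorem is_camel_case_spec : Claim_equal_is_camel_case := by
  intro name _
  unfold Spec_is_camel_case
  exact main_eq name
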